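-- pv_equiv track=rewrite | github.com/lhysgithub/DeepLog | LogKeyModel_predict.py | filter_by_mask
-- ===== SOURCE A (Python) =====
-- def filter_by_mask(line: str):
--     mask = "0. 1. 1. 1. 0. 0. 1. 1. 1. 1. 0. 1. 1. 0. 0. 1. 1. 1. 1. 1. 1. 1. 1. 1. 0. 0. 1. 1"
--     mask = [int(i) for i in mask.split(".")]
--     for i in range(len(mask)):
--         if mask[i] == 0:
--             target = str(int(i+1))
--             line = line.replace(target, "")
--     return line
-- ===== SOURCE B (Python) =====
-- def filter_by_mask(line: str):
--     # The masked-out targets are 1,5,6,11,14,15,25,26; once the single digits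
--     # 1, 5, 6 are removed the multi-digit targets can never occur, so one
--     # character-filter pass over the line gives the same result.
--     return "".join(c for c in line if c not in "156")
-- ===== Notes on version B (the rewrite author's own statement) =====
-- stated objective: simpler
-- what changed: Replaces the mask-parsing loop of eight full-string str.replace scans by a single character-filter pass, after observing that removing '1','5','6' makes the multi-digit targets 11,14,15,25,26 provably unreachable.
import Mathlib
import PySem

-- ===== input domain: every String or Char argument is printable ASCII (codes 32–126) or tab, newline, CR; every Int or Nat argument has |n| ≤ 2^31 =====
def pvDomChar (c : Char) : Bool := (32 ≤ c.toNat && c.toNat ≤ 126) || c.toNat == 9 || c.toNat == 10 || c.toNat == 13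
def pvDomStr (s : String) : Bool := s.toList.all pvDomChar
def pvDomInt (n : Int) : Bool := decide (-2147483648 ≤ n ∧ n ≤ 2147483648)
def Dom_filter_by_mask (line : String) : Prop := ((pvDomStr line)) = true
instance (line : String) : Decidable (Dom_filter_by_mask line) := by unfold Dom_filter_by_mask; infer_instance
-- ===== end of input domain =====

-- B replaces A's mask-parsing loop of eight full-string replace scans by one character-filter pass
-- (the multi-digit targets 11,14,15,25,26 are provably no-ops once '1','5','6' are removed); objective: simpler.

-- ===== PORT A =====
def filter_by_mask (line : String) : String :=
  let mask0 : String := "0. 1. 1. 1. 0. 0. 1. 1. 1. 1. 0. 1. 1. 0. 0. 1. 1. 1. 1. 1. 1. 1. 1. 1. 0. 0. 1. 1"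
  -- mask.split("."): the separator is nonempty so split? never returns none, and int(i) never fails
  -- on these pieces, so both getD defaults are unreachable on every input
  let mask : List Int := ((PySem.Str.split? mask0 ".").getD []).map (fun i => (PySem.Int.ofStr? i).getD 0)
  (PySem.List.pyRange 0 (PySem.List.len mask) 1).foldl
    (fun line i =>
      if PySem.List.pyGetD mask i 0 == 0 then
        PySem.Str.replace line (PySem.Int.toStr (i + 1)) ""
      else line) line

-- ===== PORT B =====
def filter_by_mask_alt (line : String) : String :=
  PySem.Str.join ""
    ((line.toList.filter (fun c => !(PySem.Str.isIn (String.ofList [c]) "156"))).map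
      (fun c => String.ofList [c]))

-- ===== PRECONDITION & SPEC =====
def Spec_filter_by_mask (line : String) (out : String) : Prop := out = filter_by_mask_alt line
instance (line : String) (out : String) : Decidable (Spec_filter_by_mask line out) := by unfold Spec_filter_by_mask; infer_instance

-- ===== CLAIM (what is proved, stated in full; the proofs are below) =====
def Claim_equal_filter_by_mask : Prop := ∀ (line : String), Dom_filter_by_mask line → Spec_filter_by_mask line (filter_by_mask line)

-- ===== LEMMAS AND PROOFS =====

-- A's fold over the literal mask reduces to the chain of the eight masked-out replaces.
theorem pvChainA (line : String) :
    filter_by_mask line =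
      PySem.Str.replace (PySem.Str.replace (PySem.Str.replace (PySem.Str.replace (PySem.Str.replace
        (PySem.Str.replace (PySem.Str.replace (PySem.Str.replace line "1" "") "5" "") "6" "")
        "11" "") "14" "") "15" "") "25" "") "26" "" := by
  rfl

-- removing a single character with str.replace is exactly List.filter
theorem pvGoSingleton (c : Char) : ∀ (fuel : Nat) (l acc : List Char), l.length ≤ fuel →
    PySem.Chars.replace.go [c] [] fuel l acc = acc.reverse ++ l.filter (fun x => !(x == c)) := by
  intro fuel
  induction fuel with
  | zero => intro l acc h; cases l with
    | nil => simp [PySem.Chars.replace.go]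
    | cons a t => simp at h
  | succ n ih =>
    intro l acc h
    cases l with
    | nil => simp [PySem.Chars.replace.go]
    | cons a t =>
      by_cases hc : a = c
      · subst hc
        rw [show PySem.Chars.replace.go [a] [] (n+1) (a :: t) acc = PySem.Chars.replace.go [a] [] n t acc from by
          simp [PySem.Chars.replace.go, List.isPrefixOf]]
        rw [ih t acc (by simpa using h)]
        simp
      · rw [show PySem.Chars.replace.go [c] [] (n+1) (a :: t) acc = PySem.Chars.replace.go [c] [] n t (a :: acc) from by
          simp [PySem.Chars.replace.go, List.isPrefixOf, Ne.symm hc]]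
        rw [ih t (a :: acc) (by simpa using h)]
        simp [hc]

theorem pvReplaceSingleton (c : Char) (l : List Char) :
    PySem.Chars.replace l [c] [] = l.filter (fun x => !(x == c)) := by
  rw [PySem.Chars.replace]
  simpa using pvGoSingleton c l.length l [] le_rfl

-- str.replace with a pattern that does not occur is the identity
theorem pvGoNoOcc (old : List Char) : ∀ (fuel : Nat) (l acc : List Char), l.length ≤ fuel →
    ¬ old <:+: l → PySem.Chars.replace.go old [] fuel l acc = acc.reverse ++ l := by
  intro fuel
  induction fuel with
  | zero => intro l acc h _; cases l with
    | nil => simp [PySem.Chars.replace.go]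
    | cons a t => simp at h
  | succ n ih =>
    intro l acc h hinf
    cases l with
    | nil => simp [PySem.Chars.replace.go]
    | cons a t =>
      have hp : old.isPrefixOf (a :: t) = false := by
        by_contra hh
        exact hinf ((List.isPrefixOf_iff_prefix.mp (by simpa using hh)).isInfix)
      rw [show PySem.Chars.replace.go old [] (n+1) (a :: t) acc = PySem.Chars.replace.go old [] n t (a :: acc) from by
        simp [PySem.Chars.replace.go, hp]]
      rw [ih t (a :: acc) (by simpa using h) (fun hi => hinf (hi.trans (List.suffix_cons a t).isInfix))]
      simp

theorem pvReplaceNoOcc (l old : List Char) (hne : old ≠ []) (h : ¬ old <:+: l) :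
    PySem.Chars.replace l old [] = l := by
  rw [PySem.Chars.replace]
  rw [if_neg (by simp [hne])]
  simpa using pvGoNoOcc old l.length l [] le_rfl h

-- a two-character pattern containing a filtered-out character never occurs in the filtered list
theorem pvNoOccFiltered (p : Char → Bool) (l : List Char) (old : List Char) (c : Char)
    (hc : c ∈ old) (hp : p c = false) : ¬ old <:+: (l.filter p) := by
  intro hinf
  have := List.mem_filter.mp (hinf.subset hc)
  rw [hp] at this
  exact absurd this.2 (by simp)

-- B's membership test 'c in "156"' is the three-way character comparison
theorem pvIsInSingle (c : Char) :
    PySem.Str.isIn (String.ofList [c]) "156" = (c == '1' || c == '5' || c == '6') := by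
  rcases h : PySem.Str.isIn (String.ofList [c]) "156" with _ | _
  · rw [PySem.Str.isIn] at h
    simp [PySem.Chars.isIn_eq_false_iff, List.singleton_infix_iff] at h
    obtain ⟨h1, h5, h6⟩ := h
    simp [h1, h5, h6]
  · rw [PySem.Str.isIn, PySem.Chars.isIn_iff_infix] at h
    simp [List.singleton_infix_iff] at h
    rcases h with h | h | h <;> simp [h]

-- B on the list level: one filter pass
theorem pvAltToList (line : String) : (filter_by_mask_alt line).toList
    = line.toList.filter (fun c => !(c == '1' || c == '5' || c == '6')) := by
  simp only [filter_by_mask_alt, pvIsInSingle, PySem.Str.toList_join, List.map_map]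
  have h : (String.toList ∘ fun c => String.ofList [c]) = fun c => [c] := by
    funext c; simp
  rw [h]
  simp [PySem.Chars.join_nil_singletons]

-- ===== VERDICT (by name: the statement is the Claim_ definition above) =====
theorem filter_by_mask_spec : Claim_equal_filter_by_mask := by
  intro line _
  unfold Spec_filter_by_mask
  set p : Char → Bool := fun c => !(c == '1' || c == '5' || c == '6') with hp
  have hfilters : ((line.toList.filter (fun x => !(x == '1'))).filter (fun x => !(x == '5'))).filter
      (fun x => !(x == '6')) = line.toList.filter p := by
    simp only [List.filter_filter]
    apply List.filter_congr
    intro c _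
    cases h1 : c == '1' <;> cases h5 : c == '5' <;> cases h6 : c == '6' <;>
      simp [hp, h1, h5, h6]
  have hnoocc : ∀ old : List Char, old ≠ [] → (∃ c ∈ old, p c = false) →
      PySem.Chars.replace (line.toList.filter p) old [] = line.toList.filter p := by
    intro old hne ⟨c, hc, hpc⟩
    exact pvReplaceNoOcc _ old hne (pvNoOccFiltered p line.toList old c hc hpc)
  rw [pvChainA]
  simp only [PySem.Str.replace, String.toList_ofList]
  rw [show ("1" : String).toList = ['1'] from rfl, show ("5" : String).toList = ['5'] from rfl,
      show ("6" : String).toList = ['6'] from rfl, show ("" : String).toList = [] from rfl,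
      pvReplaceSingleton, pvReplaceSingleton, pvReplaceSingleton, hfilters]
  rw [show ("11" : String).toList = ['1','1'] from rfl, hnoocc ['1','1'] (by simp) ⟨'1', by simp, by simp [hp]⟩]
  rw [show ("14" : String).toList = ['1','4'] from rfl, hnoocc ['1','4'] (by simp) ⟨'1', by simp, by simp [hp]⟩]
  rw [show ("15" : String).toList = ['1','5'] from rfl, hnoocc ['1','5'] (by simp) ⟨'1', by simp, by simp [hp]⟩]
  rw [show ("25" : String).toList = ['2','5'] from rfl, hnoocc ['2','5'] (by simp) ⟨'5', by simp, by simp [hp]⟩]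
  rw [show ("26" : String).toList = ['2','6'] from rfl, hnoocc ['2','6'] (by simp) ⟨'6', by simp, by simp [hp]⟩]
  rw [show filter_by_mask_alt line = String.ofList ((filter_by_mask_alt line).toList) by simp]
  rw [pvAltToList]
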